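-- pv_equiv track=rewrite | github.com/Bikash989/pythonprograms | practice/check_list.py | is_part_of_series
-- ===== SOURCE A (Python) =====
-- def is_part_of_series(lst):
--     '''
--      :param:    lst - input is the set of integers (list)
--      :output:   returns true if the list is a part of the series defined by the following.
--                 f(0) = 0 f(1) = 1 f(n) = 2*f(n-1) - 2*f(n-2) for all n > 1.
--     '''
--     assert(len(lst) > 0)
--
--     if(lst[0] != 0):
--         return False
--     else:
--         if(len(lst) == 1):
--             return True
--
--     if(lst[1] != 1):
--         return False
--     else:
--         if(len(lst) == 2):
--             return True
--
--     a = 0       # first initial value is 0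
--     b = 1       # second initial value is 1
--     i = 2       # loop variable starting at 2, because we already checked for index 0 and 1
--     lst_length = len(lst)
--     while(i < lst_length):
--         c = 2 * (b - a)        # f(n) = 2 * (f(n-1) - f(n-2)) = 2 * (b - a)
--         if(c != lst[i]):
--             return False
--         a = b
--         b = c
--
--         i += 1
--
--     return True
-- ===== SOURCE B (Python) =====
-- def is_part_of_series(lst):
--     assert len(lst) > 0
--     # Closed form of the recurrence f(n) = 2*(f(n-1) - f(n-2)), f(0)=0, f(1)=1:
--     # the sequence has period-4 shape (0,1,2,2) scaled by -4 every block of 4,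
--     # so f(i) = (-4)**(i//4) * (0,1,2,2)[i%4]; check each element independently.
--     return all(x == (-4) ** (i // 4) * (0, 1, 2, 2)[i % 4] for i, x in enumerate(lst))
-- ===== Notes on version B (the rewrite author's own statement) =====
-- stated objective: alternative
-- what changed: Replaces the stateful recurrence scan (carrying f(n-1), f(n-2) with early returns) by a per-index closed form: f(i) = (-4)**(i//4) times a four-entry residue table, valid because the recurrence f(n)=2*(f(n-1)-f(n-2)) satisfies f(n+4) = -4*f(n); each element is checked independently, no carried state.
import Mathlib
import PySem

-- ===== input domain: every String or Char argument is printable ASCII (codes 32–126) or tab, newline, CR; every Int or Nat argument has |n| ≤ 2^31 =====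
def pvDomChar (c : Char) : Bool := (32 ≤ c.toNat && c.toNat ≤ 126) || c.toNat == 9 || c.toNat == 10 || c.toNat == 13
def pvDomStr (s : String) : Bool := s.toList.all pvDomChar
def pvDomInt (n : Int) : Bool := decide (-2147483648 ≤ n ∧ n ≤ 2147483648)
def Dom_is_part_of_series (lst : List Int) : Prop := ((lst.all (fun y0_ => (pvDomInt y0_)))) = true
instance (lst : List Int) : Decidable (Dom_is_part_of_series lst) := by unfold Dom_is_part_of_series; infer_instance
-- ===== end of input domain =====

-- B replaces A's stateful recurrence scan by a per-index closed form
-- f(i) = (-4)^(i//4) * (0,1,2,2)[i%4] (valid since f(n+4) = -4*f(n)); objective: alternative.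

-- ===== PORT A =====
-- A's while loop over index i with state (a, b); the guard `i < lst.length` is the loop condition
def isPartLoopA (lst : List Int) (a b : Int) (i : Nat) : Bool :=
  if h : i < lst.length then
    -- c = 2 * (b - a) inlined
    if 2 * (b - a) ≠ lst[i] then false
    else isPartLoopA lst b (2 * (b - a)) (i + 1)
  else true
termination_by lst.length - i

def is_part_of_series (lst : List Int) : Bool :=
  if lst.headI ≠ 0 then false
  else if lst.length = 1 then true
  else if lst.tail.headI ≠ 1 then false
  else if lst.length = 2 then true
  else isPartLoopA lst 0 1 2

-- ===== PORT B =====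
-- (-4) ** (i // 4) * (0, 1, 2, 2)[i % 4]; enumerate indices are ≥ 0, so the
-- Nat-power via .toNat is exact, and i % 4 ∈ {0,1,2,3} so the if-chain is the tuple lookup
def fBase (r : Int) : Int := if r = 0 then 0 else if r = 1 then 1 else 2
def fClosedI (i : Int) : Int :=
  (-4 : Int) ^ (PySem.Int.floordiv i 4).toNat * fBase (PySem.Int.mod i 4)

def is_part_of_series_alt (lst : List Int) : Bool :=
  (PySem.List.enumerate lst 0).all (fun p => p.2 == fClosedI p.1)

-- ===== PRECONDITION & SPEC =====
-- Pre_ excludes only the empty list, on which A's `assert len(lst) > 0` raises AssertionError.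
def Pre_is_part_of_series (lst : List Int) : Prop := lst ≠ []
instance (lst : List Int) : Decidable (Pre_is_part_of_series lst) := by unfold Pre_is_part_of_series; infer_instance
def pvWitness_is_part_of_series : List Int := [0, 1, 2]

def Spec_is_part_of_series (lst : List Int) (out : Bool) : Prop := out = is_part_of_series_alt lst
instance (lst : List Int) (out : Bool) : Decidable (Spec_is_part_of_series lst out) := by unfold Spec_is_part_of_series; infer_instance

-- ===== CLAIM (what is proved, stated in full; the proofs are below) =====
def Claim_equal_is_part_of_series : Prop := ∀ (lst : List Int), Dom_is_part_of_series lst → Pre_is_part_of_series lst → Spec_is_part_of_series lst (is_part_of_series lst)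

-- ===== LEMMAS AND PROOFS =====

-- the closed form on a Nat index
def fN (n : Nat) : Int := (-4) ^ (n / 4) * fBase ((n % 4 : Nat) : Int)

theorem fClosedI_natCast (n : Nat) : fClosedI (n : Int) = fN n := by
  unfold fClosedI fN
  rw [show ((4 : Int)) = ((4 : Nat) : Int) by norm_num,
    PySem.Int.floordiv_natCast, PySem.Int.mod_natCast, Int.toNat_natCast]

-- the closed form satisfies A's recurrence
theorem fN_rec (n : Nat) : fN (n + 2) = 2 * (fN (n + 1) - fN n) := by
  obtain ⟨q, r, hr, rfl⟩ : ∃ q r, r < 4 ∧ n = 4 * q + r :=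
    ⟨n / 4, n % 4, by omega, by omega⟩
  unfold fN fBase
  interval_cases r
  · rw [show (4*q+0+2)/4 = q by omega, show ((4*q+0+2)%4 : Nat) = 2 by omega,
      show (4*q+0+1)/4 = q by omega, show ((4*q+0+1)%4 : Nat) = 1 by omega,
      show (4*q+0)/4 = q by omega, show ((4*q+0)%4 : Nat) = 0 by omega]
    norm_num
    ring
  · rw [show (4*q+1+2)/4 = q by omega, show ((4*q+1+2)%4 : Nat) = 3 by omega,
      show (4*q+1+1)/4 = q by omega, show ((4*q+1+1)%4 : Nat) = 2 by omega,
      show (4*q+1)/4 = q by omega, show ((4*q+1)%4 : Nat) = 1 by omega]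
    norm_num; ring
  · rw [show (4*q+2+2)/4 = q+1 by omega, show ((4*q+2+2)%4 : Nat) = 0 by omega,
      show (4*q+2+1)/4 = q by omega, show ((4*q+2+1)%4 : Nat) = 3 by omega,
      show (4*q+2)/4 = q by omega, show ((4*q+2)%4 : Nat) = 2 by omega]
    norm_num
  · rw [show (4*q+3+2)/4 = q+1 by omega, show ((4*q+3+2)%4 : Nat) = 1 by omega,
      show (4*q+3+1)/4 = q+1 by omega, show ((4*q+3+1)%4 : Nat) = 0 by omega,
      show (4*q+3)/4 = q by omega, show ((4*q+3)%4 : Nat) = 3 by omega]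
    norm_num [pow_succ]; ring

-- common reference: check the list elementwise against fN from index n
def checkFrom : List Int → Nat → Bool
  | [], _ => true
  | x :: xs, n => (x == fN n) && checkFrom xs (n + 1)

theorem alt_eq_checkFrom (xs : List Int) :
    ∀ n : Nat, ((PySem.List.enumerate xs (n : Int)).all (fun p => p.2 == fClosedI p.1))
      = checkFrom xs n := by
  induction xs with
  | nil => intro n; simp [PySem.List.enumerate_nil, checkFrom]
  | cons x xs ih =>
    intro n
    rw [PySem.List.enumerate_cons, checkFrom, List.all_cons,
      show ((n : Int) + 1) = ((n + 1 : Nat) : Int) by push_cast; ring, ih (n + 1)]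
    simp [fClosedI_natCast]

-- A's index loop, rephrased on the suffix of the list it still has to inspect
def tailLoop (xs : List Int) (a b : Int) : Bool :=
  match xs with
  | [] => true
  | x :: xs => if 2 * (b - a) ≠ x then false else tailLoop xs b (2 * (b - a))

theorem isPartLoopA_eq_tailLoop (lst : List Int) :
    ∀ k i a b, lst.length - i = k → isPartLoopA lst a b i = tailLoop (lst.drop i) a b := by
  intro k
  induction k with
  | zero =>
    intro i a b hk
    have h : ¬ i < lst.length := by omega
    rw [isPartLoopA, dif_neg h, List.drop_eq_nil_of_le (by omega), tailLoop]
  | succ k ih =>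
    intro i a b hk
    have h : i < lst.length := by omega
    rw [isPartLoopA, dif_pos h, List.drop_eq_getElem_cons h, tailLoop]
    split_ifs with hc
    · rfl
    · exact ih (i + 1) _ _ (by omega)

theorem tailLoop_eq_checkFrom (xs : List Int) :
    ∀ n a b, a = fN n → b = fN (n + 1) → tailLoop xs a b = checkFrom xs (n + 2) := by
  induction xs with
  | nil => intro n a b _ _; rfl
  | cons x xs ih =>
    intro n a b ha hb
    have hc : 2 * (b - a) = fN (n + 2) := by rw [ha, hb, fN_rec]
    rw [tailLoop, checkFrom, hc]
    by_cases hx : fN (n + 2) = x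
    · rw [if_neg (by simp [hx]), ih (n + 1) _ _ hb rfl]
      simp [hx]
    · rw [if_pos hx]
      simp [Ne.symm hx]

theorem fN0 : fN 0 = 0 := by decide
theorem fN1 : fN 1 = 1 := by decide

theorem alt_eq (lst : List Int) : is_part_of_series_alt lst = checkFrom lst 0 := by
  unfold is_part_of_series_alt
  rw [show ((0 : Int)) = ((0 : Nat) : Int) by norm_num, alt_eq_checkFrom]

-- ===== VERDICT (by name: the statement is the Claim_ definition above) =====
theorem is_part_of_series_spec : Claim_equal_is_part_of_series := by
  intro lst _ hpre
  unfold Spec_is_part_of_series is_part_of_series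
  rw [alt_eq]
  match lst, hpre with
  | [x], _ =>
    by_cases hx : x = 0 <;> simp [hx, checkFrom, fN0]
  | [x, y], _ =>
    by_cases hx : x = 0 <;> by_cases hy : y = 1 <;> simp [hx, hy, checkFrom, fN0, fN1]
  | x :: y :: z :: rest, _ =>
    simp only [List.headI, List.tail, List.length_cons]
    by_cases hx : x = 0
    · by_cases hy : y = 1
      · rw [if_neg (by simp [hx]), if_neg (by simp), if_neg (by simp [hy]), if_neg (by simp),
          isPartLoopA_eq_tailLoop _ _ 2 0 1 rfl]
        have hdrop : (x :: y :: z :: rest).drop 2 = z :: rest := rfl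
        rw [hdrop, tailLoop_eq_checkFrom _ 0 0 1 fN0.symm fN1.symm]
        simp [hx, hy, checkFrom, fN0, fN1]
      · simp [hx, hy, checkFrom, fN0, fN1]
    · simp [hx, checkFrom, fN0]

theorem pv_witness_ok : Dom_is_part_of_series pvWitness_is_part_of_series ∧ Pre_is_part_of_series pvWitness_is_part_of_series := by decide
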